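-- pv_equiv track=rewrite | github.com/NikitosBarboc/100_days_of_python- | days1-15/love_clac.py | calc_love_helper
-- ===== SOURCE A (Python) =====
-- true = ['t', 'r', 'u', 'e']
--
-- love = ['l', 'o', 'v', 'e']
--
-- def calc_love_helper(name):
--     res1 = 0
--     res2 = 0
--     for i in range(len(name)):
--         if name[i].lower() in love:
--             res1 += 1
--         if name[i].lower() in true:
--             res2 += 1
--     return res1, res2
-- ===== SOURCE B (Python) =====
-- true = ['t', 'r', 'u', 'e']
--
-- love = ['l', 'o', 'v', 'e']
--
-- def calc_love_helper(name):
--     freq = {}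
--     for ch in name:
--         c = ch.lower()
--         freq[c] = freq.get(c, 0) + 1
--     res1 = sum(freq.get(c, 0) for c in love)
--     res2 = sum(freq.get(c, 0) for c in true)
--     return res1, res2
-- ===== Notes on version B (the rewrite author's own statement) =====
-- stated objective: faster
-- what changed: B builds a frequency table of the lowercased characters in one pass and then sums the counts of the four fixed letters of each target word, replacing A's per-character list-membership tests and indexed access (name[i]) with a single dict lookup per character.
import Mathlib
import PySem

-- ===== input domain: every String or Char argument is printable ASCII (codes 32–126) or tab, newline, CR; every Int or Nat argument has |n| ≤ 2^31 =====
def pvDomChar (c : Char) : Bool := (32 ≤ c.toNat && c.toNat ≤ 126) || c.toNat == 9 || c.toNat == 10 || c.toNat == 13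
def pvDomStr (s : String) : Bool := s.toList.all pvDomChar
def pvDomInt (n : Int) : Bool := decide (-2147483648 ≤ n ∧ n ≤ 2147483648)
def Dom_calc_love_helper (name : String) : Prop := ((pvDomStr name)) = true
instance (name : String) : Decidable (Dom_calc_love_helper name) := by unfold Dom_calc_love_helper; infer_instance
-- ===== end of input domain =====

-- B tabulates lowercased-character frequencies once and sums the counts of the fixed
-- target letters, instead of A's per-character membership tests with two counters.


-- module-level constants 'love' and 'true' (characters, as the Python lists hold 1-char strings)
def pyLove : List Char := ['l', 'o', 'v', 'e']
def pyTrue : List Char := ['t', 'r', 'u', 'e']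

-- ===== PORT A =====
-- for i in range(len(name)): membership tests on name[i].lower(); the ' ' default of
-- pyGetD is never used since every i of the range is in bounds.
def calc_love_helper (name : String) : Int × Int :=
  (PySem.List.pyRange 0 (name.toList.length : Int) 1).foldl
    (fun (r : Int × Int) i =>
      let c := PySem.Chars.lowerChar (PySem.List.pyGetD name.toList i ' ')
      (if c ∈ pyLove then r.1 + 1 else r.1,
       if c ∈ pyTrue then r.2 + 1 else r.2))
    (0, 0)

-- ===== PORT B =====
def calc_love_helper_alt (name : String) : Int × Int :=
  let freq : PySem.Dict Char Int :=
    name.toList.foldl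
      (fun d ch =>
        let c := PySem.Chars.lowerChar ch
        d.insert c (d.getD c 0 + 1))
      PySem.Dict.empty
  ((pyLove.map (fun c => freq.getD c 0)).sum,
   (pyTrue.map (fun c => freq.getD c 0)).sum)

-- ===== PRECONDITION & SPEC =====
def Spec_calc_love_helper (name : String) (out : Int × Int) : Prop := out = calc_love_helper_alt name
instance (name : String) (out : Int × Int) : Decidable (Spec_calc_love_helper name out) := by unfold Spec_calc_love_helper; infer_instance

-- ===== CLAIM (what is proved, stated in full; the proofs are below) =====
def Claim_equal_calc_love_helper : Prop := ∀ (name : String), Dom_calc_love_helper name → Spec_calc_love_helper name (calc_love_helper name)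

-- ===== LEMMAS AND PROOFS =====

-- A's loop, as a fold over the characters, adds to each counter the number of
-- characters whose lowercase form lies in the corresponding word.
theorem aFold_eq (l : List Char) (a b : Int) :
    l.foldl
      (fun (r : Int × Int) ch =>
        let c := PySem.Chars.lowerChar ch
        (if c ∈ pyLove then r.1 + 1 else r.1,
         if c ∈ pyTrue then r.2 + 1 else r.2))
      (a, b)
    = (a + (l.countP (fun ch => PySem.Chars.lowerChar ch ∈ pyLove) : Int),
       b + (l.countP (fun ch => PySem.Chars.lowerChar ch ∈ pyTrue) : Int)) := by
  induction l generalizing a b with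
  | nil => simp
  | cons x xs ih =>
    simp only [List.foldl_cons, List.countP_cons, ih]
    by_cases h1 : PySem.Chars.lowerChar x ∈ pyLove <;>
      by_cases h2 : PySem.Chars.lowerChar x ∈ pyTrue <;>
        simp [h1, h2, Prod.ext_iff] <;> omega

-- summing the per-letter counts of a word with distinct letters counts membership
theorem sum_counts_love (l : List Char) :
    (pyLove.map (fun c => (l.count c : Int))).sum
      = (l.countP (fun ch => ch ∈ pyLove) : Int) := by
  induction l with
  | nil => simp [pyLove]
  | cons x xs ih =>
    simp only [pyLove, List.count_cons, List.countP_cons] at *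
    by_cases h1 : x = 'l' <;> by_cases h2 : x = 'o' <;> by_cases h3 : x = 'v' <;>
      by_cases h4 : x = 'e' <;> simp_all <;> omega

theorem sum_counts_true (l : List Char) :
    (pyTrue.map (fun c => (l.count c : Int))).sum
      = (l.countP (fun ch => ch ∈ pyTrue) : Int) := by
  induction l with
  | nil => simp [pyTrue]
  | cons x xs ih =>
    simp only [pyTrue, List.count_cons, List.countP_cons] at *
    by_cases h1 : x = 't' <;> by_cases h2 : x = 'r' <;> by_cases h3 : x = 'u' <;>
      by_cases h4 : x = 'e' <;> simp_all <;> omega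

-- ===== VERDICT (by name: the statement is the Claim_ definition above) =====
theorem calc_love_helper_spec : Claim_equal_calc_love_helper := by
  intro name _
  unfold Spec_calc_love_helper calc_love_helper calc_love_helper_alt
  rw [PySem.List.foldl_pyRange_zero_pyGetD'
        (f := fun (r : Int × Int) ch =>
          let c := PySem.Chars.lowerChar ch
          ((if c ∈ pyLove then r.1 + 1 else r.1 : Int),
           (if c ∈ pyTrue then r.2 + 1 else r.2 : Int)))
        (xs := name.toList) (d := ' ') (init := ((0 : Int), (0 : Int)))]
  have hfreq : ∀ (v : Char),
      (name.toList.foldl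
        (fun (d : PySem.Dict Char Int) ch =>
          let c := PySem.Chars.lowerChar ch
          d.insert c (d.getD c 0 + 1)) PySem.Dict.empty).getD v 0
      = ((name.toList.map PySem.Chars.lowerChar).count v : Int) := by
    intro v
    rw [show (fun (d : PySem.Dict Char Int) ch =>
          let c := PySem.Chars.lowerChar ch
          d.insert c (d.getD c 0 + 1))
        = (fun (d : PySem.Dict Char Int) ch =>
          (fun d x => PySem.Dict.insert d x (d.getD x 0 + 1)) d (PySem.Chars.lowerChar ch)) from rfl,
      ← List.foldl_map (f := PySem.Chars.lowerChar)
        (g := fun (d : PySem.Dict Char Int) x => d.insert x (d.getD x 0 + 1)),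
      PySem.Dict.getD_foldl_insert_add_one]
    simp
  simp only [hfreq, aFold_eq]
  have hl := sum_counts_love (name.toList.map PySem.Chars.lowerChar)
  have ht := sum_counts_true (name.toList.map PySem.Chars.lowerChar)
  simp only [List.countP_map, Function.comp_def] at hl ht
  simp only [Prod.mk.injEq]
  refine ⟨?_, ?_⟩
  · rw [hl]; omega
  · rw [ht]; omega
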